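-- pv_equiv track=rewrite | github.com/SylvainDe/aoc | python/2024/day10.py | get_trailhead_score_sum2
-- ===== SOURCE A (Python) =====
-- import collections
--
-- def get_neighbours(pos):
--     x, y = pos
--     yield x, y + 1
--     yield x, y - 1
--     yield x + 1, y
--     yield x - 1, y
--
-- def get_neighbours_with_val(pos, grid, val):
--     for neig in get_neighbours(pos):
--         if grid.get(neig, -1) == val:
--             yield neig
--
-- def get_trailhead_score_sum2(grid):
--     reachable = {p: 1 for p, v in grid.items() if v == 0}
--     for v in range(9):
--         assert all(grid[pos] == v for pos in reachable)
--         new_reachable = collections.defaultdict(int)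
--         for pos, nb in reachable.items():
--             for neig in get_neighbours_with_val(pos, grid, v + 1):
--                 new_reachable[neig] += nb
--         reachable = new_reachable
--         assert all(grid[pos] == v + 1 for pos in reachable)
--     return sum(reachable.values())
-- ===== SOURCE B (Python) =====
-- def get_neighbours(pos):
--     x, y = pos
--     yield x, y + 1
--     yield x, y - 1
--     yield x + 1, y
--     yield x - 1, y
--
-- def get_trailhead_score_sum2(grid):
--     def paths(pos):
--         v = grid[pos]
--         if v == 9:
--             return 1
--         return sum(paths(neig) for neig in get_neighbours(pos)
--                    if grid.get(neig, -1) == v + 1)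
--     return sum(paths(p) for p, v in grid.items() if v == 0)
-- ===== Notes on version B (the rewrite author's own statement) =====
-- stated objective: alternative
-- what changed: A sweeps levels 0..9 forward, pushing path counts through a defaultdict from trailheads to peaks; B instead counts per cell by a backward recursion paths(pos) = 1 at a 9-cell else the sum over the +1-valued neighbours, summed over the 0-cells, with no level loop and no count dict.
import Mathlib
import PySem

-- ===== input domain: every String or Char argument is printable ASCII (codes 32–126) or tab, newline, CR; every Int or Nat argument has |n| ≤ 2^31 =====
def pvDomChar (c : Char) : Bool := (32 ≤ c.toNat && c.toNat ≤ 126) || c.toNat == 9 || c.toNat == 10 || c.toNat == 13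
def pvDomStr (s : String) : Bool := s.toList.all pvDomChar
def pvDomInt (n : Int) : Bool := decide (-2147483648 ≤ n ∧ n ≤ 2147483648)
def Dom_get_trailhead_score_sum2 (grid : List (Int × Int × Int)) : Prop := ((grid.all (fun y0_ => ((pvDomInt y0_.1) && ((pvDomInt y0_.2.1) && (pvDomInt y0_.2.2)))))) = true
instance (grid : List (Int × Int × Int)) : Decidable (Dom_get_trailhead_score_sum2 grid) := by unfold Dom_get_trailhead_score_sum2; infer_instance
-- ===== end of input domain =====

-- B replaces A's forward level-by-level dict sweep (0→9, counts pushed to neighbours through a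
-- defaultdict) by a per-cell backward recursion counting trails from each cell up to a 9;
-- objective: alternative decomposition, same cost on typical grids.

-- ===== PORT A =====
-- the dict argument: the harness passes grid as a Python dict; build it from the item list
-- exactly as dict(...) does (last value wins, first position kept)
def pvGridDict (grid : List (Int × Int × Int)) : PySem.Dict (Int × Int) Int :=
  grid.foldl (fun d t => d.insert (t.1, t.2.1) t.2.2) PySem.Dict.empty

-- get_neighbours(pos)
def pvNbs (pos : Int × Int) : List (Int × Int) :=
  [(pos.1, pos.2 + 1), (pos.1, pos.2 - 1), (pos.1 + 1, pos.2), (pos.1 - 1, pos.2)]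

-- get_neighbours_with_val(pos, grid, val)
def pvNbsWithVal (pos : Int × Int) (g : PySem.Dict (Int × Int) Int) (val : Int) : List (Int × Int) :=
  (pvNbs pos).filter (fun q => g.getD q (-1) == val)

def get_trailhead_score_sum2 (grid : List (Int × Int × Int)) : Int :=
  let g := pvGridDict grid
  -- reachable = {p: 1 for p, v in grid.items() if v == 0}
  let reachable0 := g.items.foldl
    (fun d pv => if pv.2 == 0 then d.insert pv.1 (1 : Int) else d) PySem.Dict.empty
  -- for v in range(9): new_reachable = defaultdict(int); … ; reachable = new_reachable
  -- (the asserts are pure checks that never fire and compute nothing)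
  let final := (PySem.List.pyRange 0 9).foldl
    (fun reachable v =>
      reachable.items.foldl
        (fun nr pn =>
          (pvNbsWithVal pn.1 g (v + 1)).foldl (fun nr q => nr.modify q 0 (· + pn.2)) nr)
        PySem.Dict.empty)
    reachable0
  -- sum(reachable.values())
  final.values.sum

-- ===== PORT B =====
-- paths(pos): 1 at a 9-cell, else the sum over the strictly +1 neighbours.  Python needs no
-- fuel (the cell value rises by 1 per call and stops at 9); fuel 10 makes the same recursion
-- structural and is never exhausted on the calls B makes (they start at value 0).
def pvPaths (g : PySem.Dict (Int × Int) Int) : Nat → Int × Int → Int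
  | 0, _ => 0
  | fuel + 1, pos =>
    match g.get? pos with
    | none => 0   -- python would raise KeyError; paths is only called on keys of g
    | some v =>
      if v == 9 then 1
      else (((pvNbs pos).filter (fun q => g.getD q (-1) == v + 1)).map
              (fun q => pvPaths g fuel q)).sum

def get_trailhead_score_sum2_alt (grid : List (Int × Int × Int)) : Int :=
  let g := pvGridDict grid
  -- sum(paths(p) for p, v in grid.items() if v == 0)
  ((g.items.filter (fun pv => pv.2 == 0)).map (fun pv => pvPaths g 10 pv.1)).sum

-- ===== PRECONDITION & SPEC =====
def Spec_get_trailhead_score_sum2 (grid : List (Int × Int × Int)) (out : Int) : Prop := out = get_trailhead_score_sum2_alt grid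
instance (grid : List (Int × Int × Int)) (out : Int) : Decidable (Spec_get_trailhead_score_sum2 grid out) := by unfold Spec_get_trailhead_score_sum2; infer_instance

-- ===== CLAIM (what is proved, stated in full; the proofs are below) =====
def Claim_equal_get_trailhead_score_sum2 : Prop := ∀ (grid : List (Int × Int × Int)), Dom_get_trailhead_score_sum2 grid → Spec_get_trailhead_score_sum2 grid (get_trailhead_score_sum2 grid)

-- ===== LEMMAS AND PROOFS =====

-- weighted sum of a count dict against a scoring function
def pvWS (d : PySem.Dict (Int × Int) Int) (h : Int × Int → Int) : Int :=
  (d.items.map (fun pn => pn.2 * h pn.1)).sum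

theorem pvGridDict_nodup (grid : List (Int × Int × Int)) : (pvGridDict grid).keys.Nodup := by
  unfold pvGridDict
  exact PySem.Dict.nodup_keys_foldl_insert_key grid (fun t => (t.1, t.2.1)) (fun d t => t.2.2) _
    (by simp [PySem.Dict.keys_empty])

-- replacing the (unique) entry at key q by (q, w + n) adds n * h q to the weighted sum
theorem pv_sum_map_replace (l : List ((Int × Int) × Int)) (q : Int × Int) (w n : Int)
    (h : Int × Int → Int) (hnd : (l.map Prod.fst).Nodup) (hmem : (q, w) ∈ l) :
    ((l.map (fun p => if (p.1 == q) = true then (q, w + n) else p)).map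
        (fun pn => pn.2 * h pn.1)).sum
      = (l.map (fun pn => pn.2 * h pn.1)).sum + n * h q := by
  induction l with
  | nil => simp at hmem
  | cons a l ih =>
    simp only [List.map_cons, List.nodup_cons, List.mem_map] at hnd
    rcases hnd with ⟨ha, hnd⟩
    by_cases hq : a.1 = q
    · have hql : ∀ p ∈ l, p.1 ≠ q := by
        intro p hp hpq; exact ha ⟨p, hp, by rw [hpq, hq]⟩
      have haw : a = (q, w) := by
        rcases List.mem_cons.mp hmem with h1 | h1
        · exact h1.symm
        · exact absurd (rfl : q = q) (by simpa using hql _ h1)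
      have htail : l.map (fun p => if (p.1 == q) = true then (q, w + n) else p) = l := by
        conv_rhs => rw [← List.map_id l]
        apply List.map_congr_left
        intro p hp
        simp [hql p hp]
      subst haw
      simp only [htail, beq_self_eq_true, if_true, List.map_cons, List.sum_cons]
      ring
    · have h1 : (q, w) ∈ l := by
        rcases List.mem_cons.mp hmem with h1 | h1
        · exact absurd (congrArg Prod.fst h1.symm) hq
        · exact h1
      have := ih hnd h1
      simp only [List.map_cons, List.sum_cons]
      rw [if_neg (by simpa using hq)]
      rw [this]; ring

-- new_reachable[q] += n changes the weighted sum by n * h q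
theorem pvWS_modify (d : PySem.Dict (Int × Int) Int) (h : Int × Int → Int) (q : Int × Int)
    (n : Int) (hnd : d.keys.Nodup) :
    pvWS (d.modify q 0 (· + n)) h = pvWS d h + n * h q := by
  unfold pvWS
  rw [PySem.Dict.modify]
  by_cases hc : d.contains q = true
  · have hsome : ∃ w, d.get? q = some w := by
      have := PySem.Dict.contains_eq_isSome_get? d q
      rw [hc] at this
      exact Option.isSome_iff_exists.mp this.symm
    rcases hsome with ⟨w, hw⟩
    have hgd : d.getD q 0 = w := PySem.Dict.getD_of_get?_eq_some _ _ hw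
    have hmem : (q, w) ∈ d.items := PySem.Dict.mem_items_of_get?_eq_some _ hw
    rw [PySem.Dict.items_insert, if_pos hc, hgd]
    exact pv_sum_map_replace d.items q w n h (by simpa [PySem.Dict.keys] using hnd) hmem
  · have hgd : d.getD q 0 = 0 := PySem.Dict.getD_of_not_contains _ _ (by simpa using hc)
    rw [PySem.Dict.items_insert, if_neg hc, hgd]
    simp [add_comm]

theorem pv_nodup_modify (d : PySem.Dict (Int × Int) Int) (q : Int × Int) (n : Int)
    (hnd : d.keys.Nodup) : (d.modify q 0 (· + n)).keys.Nodup := by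
  rw [PySem.Dict.keys_modify]
  exact PySem.Dict.nodup_keys_insert _ _ _ hnd

theorem pv_mem_keys_modify (d : PySem.Dict (Int × Int) Int) (q k : Int × Int) (n : Int)
    (hk : k ∈ (d.modify q 0 (· + n)).keys) : k = q ∨ k ∈ d.keys := by
  rw [PySem.Dict.keys_modify] at hk
  exact (PySem.Dict.mem_keys_insert _ _ _ _).mp hk

-- inner loop: for neig in …: new_reachable[neig] += nb
theorem pv_inner_fold (L : List (Int × Int)) (n : Int) (h : Int × Int → Int) :
    ∀ (nr : PySem.Dict (Int × Int) Int), nr.keys.Nodup →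
      (pvWS (L.foldl (fun nr q => nr.modify q 0 (· + n)) nr) h
          = pvWS nr h + n * (L.map h).sum)
      ∧ (L.foldl (fun nr q => nr.modify q 0 (· + n)) nr).keys.Nodup
      ∧ (∀ k ∈ (L.foldl (fun nr q => nr.modify q 0 (· + n)) nr).keys, k ∈ nr.keys ∨ k ∈ L) := by
  induction L with
  | nil => intro nr hnd; exact ⟨by simp, hnd, fun k hk => Or.inl hk⟩
  | cons q L ih =>
    intro nr hnd
    simp only [List.foldl_cons]
    obtain ⟨hws, hnd', hmem⟩ := ih (nr.modify q 0 (· + n)) (pv_nodup_modify nr q n hnd)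
    refine ⟨?_, hnd', ?_⟩
    · rw [hws, pvWS_modify nr h q n hnd]
      simp only [List.map_cons, List.sum_cons]
      ring
    · intro k hk
      rcases hmem k hk with hk' | hk'
      · rcases pv_mem_keys_modify nr q k n hk' with hk'' | hk''
        · exact Or.inr (by simp [hk''])
        · exact Or.inl hk''
      · exact Or.inr (List.mem_cons_of_mem _ hk')

-- outer loop: for pos, nb in reachable.items(): …
theorem pv_outer_fold (F : Int × Int → List (Int × Int)) (h : Int × Int → Int)
    (ps : List ((Int × Int) × Int)) :
    ∀ (nr : PySem.Dict (Int × Int) Int), nr.keys.Nodup →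
      (pvWS (ps.foldl (fun nr pn => (F pn.1).foldl (fun nr q => nr.modify q 0 (· + pn.2)) nr) nr) h
          = pvWS nr h + (ps.map (fun pn => pn.2 * ((F pn.1).map h).sum)).sum)
      ∧ (ps.foldl (fun nr pn => (F pn.1).foldl (fun nr q => nr.modify q 0 (· + pn.2)) nr) nr).keys.Nodup
      ∧ (∀ k ∈ (ps.foldl (fun nr pn => (F pn.1).foldl (fun nr q => nr.modify q 0 (· + pn.2)) nr) nr).keys,
            k ∈ nr.keys ∨ ∃ pn ∈ ps, k ∈ F pn.1) := by
  induction ps with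
  | nil => intro nr hnd; exact ⟨by simp, hnd, fun k hk => Or.inl hk⟩
  | cons pn ps ih =>
    intro nr hnd
    simp only [List.foldl_cons]
    obtain ⟨hws1, hnd1, hmem1⟩ := pv_inner_fold (F pn.1) pn.2 h nr hnd
    obtain ⟨hws2, hnd2, hmem2⟩ := ih _ hnd1
    refine ⟨?_, hnd2, ?_⟩
    · rw [hws2, hws1]
      simp only [List.map_cons, List.sum_cons]
      ring
    · intro k hk
      rcases hmem2 k hk with hk' | hk'
      · rcases hmem1 k hk' with hk'' | hk''
        · exact Or.inl hk''
        · exact Or.inr ⟨pn, List.mem_cons_self, hk''⟩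
      · rcases hk' with ⟨pn', hpn', hkF⟩
        exact Or.inr ⟨pn', List.mem_cons_of_mem _ hpn', hkF⟩

theorem pvPaths_nine (g : PySem.Dict (Int × Int) Int) (p : Int × Int) (fuel : Nat)
    (hg : g.get? p = some 9) : pvPaths g (fuel + 1) p = 1 := by
  simp [pvPaths, hg]

theorem pvPaths_step (g : PySem.Dict (Int × Int) Int) (p : Int × Int) (fuel : Nat) (v : Int)
    (hg : g.get? p = some v) (hv : v ≠ 9) :
    pvPaths g (fuel + 1) p
      = (((pvNbs p).filter (fun q => g.getD q (-1) == v + 1)).map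
          (fun q => pvPaths g fuel q)).sum := by
  simp [pvPaths, hg, hv]

-- the main loop: folding the remaining levels v..8 over a dict whose keys all sit at value v
-- turns the weighted sum against pvPaths at the matching fuel into the final value sum
theorem pv_loop (g : PySem.Dict (Int × Int) Int) :
    ∀ (k : Nat) (v : Int), v = 9 - (k : Int) → k ≤ 9 →
    ∀ (d : PySem.Dict (Int × Int) Int), d.keys.Nodup →
      (∀ pn ∈ d.items, g.get? pn.1 = some v) →
      ((PySem.List.pyRange v 9).foldl
        (fun reachable v =>
          reachable.items.foldl
            (fun nr pn =>
              (pvNbsWithVal pn.1 g (v + 1)).foldl (fun nr q => nr.modify q 0 (· + pn.2)) nr)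
            PySem.Dict.empty)
        d).values.sum
      = pvWS d (pvPaths g (k + 1)) := by
  intro k
  induction k with
  | zero =>
    intro v hv _ d hdnd hdval
    subst hv
    norm_num
    unfold pvWS
    have : ∀ pn ∈ d.items, pn.2 * pvPaths g 1 pn.1 = pn.2 := by
      intro pn hpn
      rw [pvPaths_nine g pn.1 0 (by simpa using hdval pn hpn), mul_one]
    rw [List.map_congr_left this]
    simp [PySem.Dict.values]
  | succ k ih =>
    intro v hv hk9 d hdnd hdval
    have hvlt : v < 9 := by omega
    have hvge : (0:Int) ≤ v := by push_cast at hv ⊢; omega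
    rw [PySem.List.pyRange_one_cons hvlt]
    simp only [List.foldl_cons]
    obtain ⟨hws, hnd', hmem'⟩ :=
      pv_outer_fold (fun p => pvNbsWithVal p g (v + 1)) (pvPaths g (k + 1)) d.items
        PySem.Dict.empty (by simp [PySem.Dict.keys_empty])
    set body := d.items.foldl
      (fun nr pn => (pvNbsWithVal pn.1 g (v + 1)).foldl (fun nr q => nr.modify q 0 (· + pn.2)) nr)
      PySem.Dict.empty with hbody
    have hval' : ∀ pn ∈ body.items, g.get? pn.1 = some (v + 1) := by
      intro pn hpn
      have hkmem : pn.1 ∈ body.keys := by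
        simp only [PySem.Dict.keys]
        exact List.mem_map_of_mem hpn
      rcases hmem' pn.1 hkmem with hk | ⟨pn', _, hkF⟩
      · simp [PySem.Dict.keys_empty] at hk
      · unfold pvNbsWithVal at hkF
        have := (List.mem_filter.mp hkF).2
        have hgd : g.getD pn.1 (-1) = v + 1 := by simpa using this
        rw [PySem.Dict.getD_eq_get?_getD] at hgd
        cases hgq : g.get? pn.1 with
        | none => rw [hgq] at hgd; simp at hgd; omega
        | some w => rw [hgq] at hgd; simp at hgd; rw [hgd]
    have hv' : v + 1 = 9 - (k : Int) := by push_cast at hv ⊢; omega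
    rw [ih (v + 1) hv' (by omega) body hnd' hval', hws]
    unfold pvWS
    have : ∀ pn ∈ d.items,
        pn.2 * ((pvNbsWithVal pn.1 g (v + 1)).map (pvPaths g (k + 1))).sum
          = pn.2 * pvPaths g (k + 1 + 1) pn.1 := by
      intro pn hpn
      rw [pvPaths_step g pn.1 (k+1) v (hdval pn hpn) (by omega)]
      rfl
    rw [List.map_congr_left this]
    simp [PySem.Dict.empty]

-- the initial dict {p: 1 for p, v in grid.items() if v == 0}
theorem pv_init (l : List ((Int × Int) × Int)) :
    ∀ (d0 : PySem.Dict (Int × Int) Int), (∀ pv ∈ l, d0.contains pv.1 = false) →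
      (l.map Prod.fst).Nodup →
      (l.foldl (fun d pv => if pv.2 == 0 then d.insert pv.1 (1 : Int) else d) d0).items
        = d0.items ++ (l.filter (fun pv => pv.2 == 0)).map (fun pv => (pv.1, (1 : Int))) := by
  induction l with
  | nil => intro d0 _ _; simp
  | cons pv l ih =>
    intro d0 hfresh hnd
    simp only [List.map_cons, List.nodup_cons, List.mem_map] at hnd
    rcases hnd with ⟨hh, hnd⟩
    by_cases h0 : pv.2 == 0
    · simp only [List.foldl_cons, h0, if_true]
      have hfresh' : ∀ p ∈ l, (d0.insert pv.1 1).contains p.1 = false := by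
        intro p hp
        rw [PySem.Dict.contains_insert]
        have h1 : (p.1 == pv.1) = false := by
          simp only [beq_eq_false_iff_ne, ne_eq]
          intro he; exact hh ⟨p, hp, he⟩
        rw [h1, hfresh p (List.mem_cons_of_mem _ hp)]; rfl
      rw [ih _ hfresh' hnd, PySem.Dict.items_insert]
      rw [hfresh pv List.mem_cons_self]
      simp [h0]
    · simp only [List.foldl_cons, h0]
      rw [if_neg (by simpa using h0), ih _ (fun p hp => hfresh p (List.mem_cons_of_mem _ hp)) hnd,
        List.filter_cons_of_neg (by simpa using h0)]

-- ===== VERDICT (by name: the statement is the Claim_ definition above) =====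
theorem get_trailhead_score_sum2_spec : Claim_equal_get_trailhead_score_sum2 := by
  intro grid _
  unfold Spec_get_trailhead_score_sum2 get_trailhead_score_sum2 get_trailhead_score_sum2_alt
  set g := pvGridDict grid with hg
  have hgnd : g.keys.Nodup := pvGridDict_nodup grid
  have hgnd' : (g.items.map Prod.fst).Nodup := by simpa [PySem.Dict.keys] using hgnd
  have hr0 := pv_init g.items PySem.Dict.empty (by simp [PySem.Dict.contains_empty]) hgnd'
  set r0 := g.items.foldl (fun d pv => if pv.2 == 0 then d.insert pv.1 (1 : Int) else d)
    PySem.Dict.empty with hr0def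
  rw [show PySem.Dict.empty.items = ([] : List ((Int × Int) × Int)) from rfl,
    List.nil_append] at hr0
  have hr0nd : r0.keys.Nodup := by
    have : r0.keys = (g.items.filter (fun pv => pv.2 == 0)).map Prod.fst := by
      simp only [PySem.Dict.keys, hr0, List.map_map]
      rfl
    rw [this]
    exact ((List.filter_sublist (l := g.items)).map Prod.fst).nodup hgnd'
  have hr0val : ∀ pn ∈ r0.items, g.get? pn.1 = some 0 := by
    intro pn hpn
    rw [hr0] at hpn
    rcases List.mem_map.mp hpn with ⟨pv, hpv, hpe⟩
    rcases List.mem_filter.mp hpv with ⟨hpvg, hpv0⟩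
    have : pv = (pn.1, 0) := by
      have h2 : pv.2 = 0 := by simpa using hpv0
      have h1 : pv.1 = pn.1 := by rw [← hpe]
      rw [← h1, ← h2]
    rw [this] at hpvg
    exact PySem.Dict.get?_of_mem_items g hpvg hgnd
  have hloop := pv_loop g 9 0 (by norm_num) (by norm_num) r0 hr0nd hr0val
  rw [hloop]
  unfold pvWS
  rw [hr0, List.map_map]
  rw [List.map_congr_left (fun pv _ => by simp : ∀ pv ∈ g.items.filter (fun pv => pv.2 == 0),
    ((fun pn => pn.2 * pvPaths g (9 + 1) pn.1) ∘ fun pv => (pv.1, (1 : Int))) pv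
      = (fun pv => pvPaths g 10 pv.1) pv)]
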